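-- pv_equiv track=rewrite | github.com/JinlingY/CIC | CIC/other_functions.py | two_array_to_edges_set
-- ===== SOURCE A (Python) =====
-- def two_array_to_edges_set(array1, array2):
--     set1 = {tuple(x) for x in array1}
--     set2 = {tuple(x) for x in array2}
--     set1and2 = set1 & set2
--     set1or2 = set1 | set2
--     set1not2 = set1 - set2
--     set2not1 = set2 - set1
--     return set1and2, set1or2, set1not2, set2not1
-- ===== SOURCE B (Python) =====
-- def two_array_to_edges_set(array1, array2):
--     flags = {}
--     for x in array1:
--         flags[tuple(x)] = 1
--     for x in array2:
--         t = tuple(x)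
--         flags[t] = flags.get(t, 0) | 2
--     inter, union, only1, only2 = set(), set(), set(), set()
--     for t, f in flags.items():
--         union.add(t)
--         if f == 3:
--             inter.add(t)
--         elif f == 1:
--             only1.add(t)
--         else:
--             only2.add(t)
--     return inter, union, only1, only2
-- ===== Notes on version B (the rewrite author's own statement) =====
-- stated objective: alternative
-- what changed: Instead of building two sets and applying the four set operators (&, |, -, -), B fills one bitmask dictionary (bit 1 = occurs in array1, bit 2 = occurs in array2) in two passes over the raw arrays and reads the four result sets off the flags in a single final pass.
import Mathlib
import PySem

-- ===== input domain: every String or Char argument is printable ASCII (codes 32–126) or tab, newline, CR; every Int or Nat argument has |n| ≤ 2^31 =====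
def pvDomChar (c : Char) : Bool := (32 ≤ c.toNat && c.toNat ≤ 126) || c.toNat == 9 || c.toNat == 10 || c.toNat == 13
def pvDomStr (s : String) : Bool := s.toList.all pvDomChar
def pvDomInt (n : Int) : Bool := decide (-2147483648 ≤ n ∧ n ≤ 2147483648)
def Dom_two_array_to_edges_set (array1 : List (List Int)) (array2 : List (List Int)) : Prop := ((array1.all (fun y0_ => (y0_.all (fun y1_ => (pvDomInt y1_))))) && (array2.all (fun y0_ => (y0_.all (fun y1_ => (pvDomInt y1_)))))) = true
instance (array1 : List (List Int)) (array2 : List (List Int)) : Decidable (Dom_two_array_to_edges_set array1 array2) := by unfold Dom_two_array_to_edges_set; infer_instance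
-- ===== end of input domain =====

-- B replaces A's four set operators (&, |, -, -) by one bitmask dictionary (bit 1 =
-- occurs in array1, bit 2 = occurs in array2) filled in two passes and read off once;
-- objective: alternative decomposition, same cost.

-- ===== PORT A =====
def two_array_to_edges_set (array1 : List (List Int)) (array2 : List (List Int)) : List (List Int) × List (List Int) × List (List Int) × List (List Int) :=
  let set1 : PySem.Set (List Int) := PySem.Set.ofList array1
  let set2 : PySem.Set (List Int) := PySem.Set.ofList array2
  let set1and2 := PySem.Set.inter set1 set2
  let set1or2 := PySem.Set.union set1 set2
  let set1not2 := PySem.Set.diff set1 set2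
  let set2not1 := PySem.Set.diff set2 set1
  (set1and2, set1or2, set1not2, set2not1)

-- ===== PORT B =====
-- flags: bitmask dict; 1 = seen in array1, 2 = seen in array2, 3 = both
def two_array_to_edges_set_alt (array1 : List (List Int)) (array2 : List (List Int)) : List (List Int) × List (List Int) × List (List Int) × List (List Int) :=
  let flags0 : PySem.Dict (List Int) Int :=
    array1.foldl (fun d x => d.insert x 1) PySem.Dict.empty
  let flags : PySem.Dict (List Int) Int :=
    array2.foldl (fun d x => d.insert x (PySem.Int.bor (d.getD x 0) 2)) flags0
  let acc := flags.items.foldl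
    (fun (acc : PySem.Set (List Int) × PySem.Set (List Int) × PySem.Set (List Int) × PySem.Set (List Int)) p =>
      let u := PySem.Set.add acc.1 p.1
      if p.2 == 3 then (u, PySem.Set.add acc.2.1 p.1, acc.2.2.1, acc.2.2.2)
      else if p.2 == 1 then (u, acc.2.1, PySem.Set.add acc.2.2.1 p.1, acc.2.2.2)
      else (u, acc.2.1, acc.2.2.1, PySem.Set.add acc.2.2.2 p.1))
    (PySem.Set.empty, PySem.Set.empty, PySem.Set.empty, PySem.Set.empty)
  (acc.2.1, acc.1, acc.2.2.1, acc.2.2.2)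

-- ===== PRECONDITION & SPEC =====
def Spec_two_array_to_edges_set (array1 : List (List Int)) (array2 : List (List Int)) (out : List (List Int) × List (List Int) × List (List Int) × List (List Int)) : Prop := out = two_array_to_edges_set_alt array1 array2
instance (array1 : List (List Int)) (array2 : List (List Int)) (out : List (List Int) × List (List Int) × List (List Int) × List (List Int)) : Decidable (Spec_two_array_to_edges_set array1 array2 out) := by unfold Spec_two_array_to_edges_set; infer_instance

-- ===== CLAIM (what is proved, stated in full; the proofs are below) =====
def Claim_equal_two_array_to_edges_set : Prop := ∀ (array1 : List (List Int)) (array2 : List (List Int)), Dom_two_array_to_edges_set array1 array2 → Spec_two_array_to_edges_set array1 array2 (two_array_to_edges_set array1 array2)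

-- ===== LEMMAS AND PROOFS =====

theorem pv_nat_and_two (n : Nat) : n &&& 2 = 2 * (n / 2 % 2) := by
  have h := Nat.and_two_pow n 1
  norm_num at h
  rw [h]
  have h2 : n.testBit 1 = (n / 2).testBit 0 := by simpa using Nat.testBit_succ n 0
  rw [h2, Nat.testBit_zero]
  by_cases hc : (n / 2) % 2 = 1 <;> simp [hc] <;> omega

-- setting bit 2 twice is the same as setting it once
theorem pv_bor2_idem (a : Int) : PySem.Int.bor (PySem.Int.bor a 2) 2 = PySem.Int.bor a 2 := by
  unfold PySem.Int.bor
  by_cases h : 0 ≤ a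
  · simp [h]
  · simp only [h, if_false]
    norm_num
    set n := (-a).toNat - 1 with hn
    have e1 : n - (n &&& 2) &&& 2 = 0 := by
      have h1 := pv_nat_and_two n
      have h2 := pv_nat_and_two (n - (n &&& 2))
      omega
    have hle : ¬ (1:Int) ≤ -↑(n - (n &&& Int.toNat 2)) := by
      have : (0:Int) ≤ ↑(n - (n &&& Int.toNat 2)) := Int.natCast_nonneg _
      omega
    simp only [show Int.toNat 2 = 2 from rfl] at *
    rw [if_neg hle, e1]
    simp

-- value stored by B's first loop
theorem pv_getD_loop1 (l : List (List Int)) :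
    ∀ (d : PySem.Dict (List Int) Int) (k : List Int),
      (l.foldl (fun d x => d.insert x (1 : Int)) d).getD k 0
        = if k ∈ l then 1 else d.getD k 0 := by
  induction l with
  | nil => intro d k; simp
  | cons x xs ih =>
    intro d k
    simp only [List.foldl_cons]
    rw [ih]
    by_cases hk : k ∈ xs
    · simp [hk]
    · by_cases he : k = x
      · simp [hk, he, PySem.Dict.getD_insert]
      · simp [hk, he, PySem.Dict.getD_insert]

-- value stored by B's second loop
theorem pv_getD_loop2 (l : List (List Int)) :
    ∀ (d : PySem.Dict (List Int) Int) (k : List Int),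
      (l.foldl (fun d x => d.insert x (PySem.Int.bor (d.getD x 0) 2)) d).getD k 0
        = if k ∈ l then PySem.Int.bor (d.getD k 0) 2 else d.getD k 0 := by
  induction l with
  | nil => intro d k; simp
  | cons x xs ih =>
    intro d k
    simp only [List.foldl_cons]
    rw [ih, PySem.Dict.getD_insert]
    by_cases he : k = x
    · subst he
      by_cases hk : k ∈ xs <;> simp [hk, pv_bor2_idem]
    · by_cases hk : k ∈ xs <;> simp [hk, he]

-- the read-off loop over distinct keys splits into the four buckets
-- the read-off loop over distinct keys splits into the four buckets
theorem pv_classify4 {α : Type} [BEq α] [LawfulBEq α] (v : α → Int) (l : List α)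
    (hl : l.Nodup) :
    ∀ (u a b c : List α), (∀ x ∈ l, x ∉ u) → (∀ x ∈ l, x ∉ a) → (∀ x ∈ l, x ∉ b) →
      (∀ x ∈ l, x ∉ c) →
    l.foldl
      (fun (acc : List α × List α × List α × List α) k =>
        let u := PySem.Set.add acc.1 k
        if v k == 3 then (u, PySem.Set.add acc.2.1 k, acc.2.2.1, acc.2.2.2)
        else if v k == 1 then (u, acc.2.1, PySem.Set.add acc.2.2.1 k, acc.2.2.2)
        else (u, acc.2.1, acc.2.2.1, PySem.Set.add acc.2.2.2 k)) (u, a, b, c)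
    = (u ++ l,
       a ++ l.filter (fun k => v k == 3),
       b ++ l.filter (fun k => !(v k == 3) && (v k == 1)),
       c ++ l.filter (fun k => !(v k == 3) && !(v k == 1))) := by
  induction l with
  | nil => intro u a b c _ _ _ _; simp
  | cons x xs ih =>
    intro u a b c hu ha hb hc
    rcases List.nodup_cons.mp hl with ⟨hx, hxs⟩
    have hu' : PySem.Set.add u x = u ++ [x] := PySem.Set.add_of_not_mem (hu x (by simp))
    have fresh : ∀ (s : List α), (∀ y ∈ x :: xs, y ∉ s) → ∀ y ∈ xs, y ∉ s ++ [x] := by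
      intro s hs y hy
      have hyx : y ≠ x := fun e => hx (e ▸ hy)
      simp [hyx]
      exact hs y (by simp [hy])
    have keep : ∀ (s : List α), (∀ y ∈ x :: xs, y ∉ s) → ∀ y ∈ xs, y ∉ s := by
      intro s hs y hy; exact hs y (by simp [hy])
    simp only [List.foldl_cons, List.filter_cons]
    by_cases h3 : v x == 3
    · have e1 : PySem.Set.add a x = a ++ [x] := PySem.Set.add_of_not_mem (ha x (by simp))
      simp only [h3, if_true, hu', e1, Bool.not_true, Bool.false_and, Bool.false_eq_true,
        if_false]
      rw [ih hxs (u ++ [x]) (a ++ [x]) b c (fresh u hu) (fresh a ha) (keep b hb) (keep c hc)]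
      simp
    · by_cases h1 : v x == 1
      · have e1 : PySem.Set.add b x = b ++ [x] := PySem.Set.add_of_not_mem (hb x (by simp))
        simp only [h3, h1, Bool.false_eq_true, if_false, if_true, Bool.not_false, Bool.true_and,
          Bool.not_true, hu', e1]
        rw [ih hxs (u ++ [x]) a (b ++ [x]) c (fresh u hu) (keep a ha) (fresh b hb) (keep c hc)]
        simp
      · have e1 : PySem.Set.add c x = c ++ [x] := PySem.Set.add_of_not_mem (hc x (by simp))
        simp only [h3, h1, Bool.false_eq_true, if_false, Bool.not_false, Bool.true_and, hu', e1]
        rw [ih hxs (u ++ [x]) a b (c ++ [x]) (fresh u hu) (keep a ha) (keep b hb) (fresh c hc)]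
        simp

-- ===== VERDICT (by name: the statement is the Claim_ definition above) =====
theorem two_array_to_edges_set_spec : Claim_equal_two_array_to_edges_set := by
  intro array1 array2 _
  unfold Spec_two_array_to_edges_set two_array_to_edges_set two_array_to_edges_set_alt
  simp only []
  set s1 : PySem.Set (List Int) := PySem.Set.ofList array1 with hs1
  set s2 : PySem.Set (List Int) := PySem.Set.ofList array2 with hs2
  set flags0 : PySem.Dict (List Int) Int :=
    array1.foldl (fun d x => d.insert x (1 : Int)) PySem.Dict.empty with hf0
  set flags : PySem.Dict (List Int) Int :=
    array2.foldl (fun d x => d.insert x (PySem.Int.bor (d.getD x 0) 2)) flags0 with hf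
  have hnd0 : flags0.keys.Nodup := by
    rw [hf0]
    exact PySem.Dict.nodup_keys_foldl_insert array1 (fun _ _ => (1 : Int)) PySem.Dict.empty
      PySem.Dict.nodup_keys_empty
  have hnd : flags.keys.Nodup := by
    rw [hf]
    exact PySem.Dict.nodup_keys_foldl_insert array2
      (fun d x => PySem.Int.bor (d.getD x 0) 2) flags0 hnd0
  have hkeys0 : flags0.keys = s1 := by
    rw [hf0, PySem.Dict.keys_foldl_insert, PySem.Dict.keys_empty, hs1]
    rfl
  have hkeys : flags.keys = PySem.Set.update s1 array2 := by
    rw [hf, PySem.Dict.keys_foldl_insert, hkeys0]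
  have hval : ∀ k, flags.getD k 0
      = if k ∈ array2 then PySem.Int.bor (if k ∈ array1 then 1 else 0) 2
        else if k ∈ array1 then 1 else 0 := by
    intro k
    rw [hf, pv_getD_loop2, hf0, pv_getD_loop1, PySem.Dict.getD_empty]
  have hitems : flags.items = flags.keys.map (fun k => (k, flags.getD k 0)) :=
    PySem.Dict.items_eq_map_keys flags hnd 0
  have hcls := pv_classify4 (fun k => flags.getD k 0) flags.keys hnd
    PySem.Set.empty PySem.Set.empty PySem.Set.empty PySem.Set.empty
    (by intro x _; simp [PySem.Set.empty]) (by intro x _; simp [PySem.Set.empty])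
    (by intro x _; simp [PySem.Set.empty]) (by intro x _; simp [PySem.Set.empty])
  rw [hitems, List.foldl_map]
  simp only [] at hcls
  rw [hcls]
  simp only [PySem.Set.empty, List.nil_append]
  have hb3 : PySem.Int.bor 1 2 = (3 : Int) := by decide
  have hb2 : PySem.Int.bor 0 2 = (2 : Int) := by decide
  -- decompose the key list
  have hK : flags.keys = s1 ++ List.filter (fun y => !s1.contains y) s2 := by
    rw [hkeys, PySem.Set.update_eq_append_filter, ← hs2]
  have hUnion : PySem.Set.union s1 s2 = flags.keys := by
    have h := PySem.Set.update_eq_append_filter s1 s2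
    rw [hs2, PySem.Set.ofList_ofList, ← hs2] at h
    rw [hK]; exact h
  have hm1 : ∀ k ∈ s1, k ∈ array1 := by
    intro k hk; rw [hs1] at hk; exact (PySem.Set.mem_ofList array1 k).mp hk
  have hmt : ∀ k ∈ List.filter (fun y => !s1.contains y) s2, k ∈ array2 ∧ k ∉ array1 := by
    intro k hk
    rcases List.mem_filter.mp hk with ⟨hk2, hk1⟩
    constructor
    · rw [hs2] at hk2; exact (PySem.Set.mem_ofList array2 k).mp hk2
    · intro hmem
      rw [PySem.Set.contains_eq_listContains] at hk1
      simp at hk1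
      exact hk1 (by rw [hs1]; exact (PySem.Set.mem_ofList array1 k).mpr hmem)
  have hc2 : ∀ k, PySem.Set.contains s2 k = decide (k ∈ array2) := by
    intro k
    rw [PySem.Set.contains_eq_listContains]
    simp [hs2, PySem.Set.mem_ofList]
  have hc1 : ∀ k, PySem.Set.contains s1 k = decide (k ∈ array1) := by
    intro k
    rw [PySem.Set.contains_eq_listContains]
    simp [hs1, PySem.Set.mem_ofList]
  refine Prod.ext ?_ (Prod.ext ?_ (Prod.ext ?_ ?_)) <;>
    simp only [hK, List.filter_append]
  · -- intersection = keys with flag 3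
    show PySem.Set.inter s1 s2 = _
    have e1 : List.filter (fun k => flags.getD k 0 == 3) s1
        = List.filter (fun y => PySem.Set.contains s2 y) s1 := by
      apply List.filter_congr
      intro k hk
      have h1 := hm1 k hk
      by_cases h2 : k ∈ array2
      · simp [hval k, h1, h2, hc2, hb3, hs2, PySem.Set.mem_ofList]
      · simp [hval k, h1, h2, hc2, hs2, PySem.Set.mem_ofList]
    have e2 : List.filter (fun k => flags.getD k 0 == 3)
        (List.filter (fun y => !s1.contains y) s2) = [] := by
      rw [List.filter_eq_nil_iff]
      intro k hk
      rcases hmt k hk with ⟨h2, h1⟩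
      simp [hval k, h1, h2, hb2]
    rw [e1, e2, List.append_nil]
    rfl
  · -- union = all keys
    show PySem.Set.union s1 s2 = _
    rw [hUnion, hK]
  · -- set1 - set2 = keys with flag 1
    show PySem.Set.diff s1 s2 = _
    have e1 : List.filter (fun k => !(flags.getD k 0 == 3) && (flags.getD k 0 == 1)) s1
        = List.filter (fun y => !PySem.Set.contains s2 y) s1 := by
      apply List.filter_congr
      intro k hk
      have h1 := hm1 k hk
      by_cases h2 : k ∈ array2
      · simp [hval k, h1, h2, hc2, hb3, hs2, PySem.Set.mem_ofList]
      · simp [hval k, h1, h2, hc2, hs2, PySem.Set.mem_ofList]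
    have e2 : List.filter (fun k => !(flags.getD k 0 == 3) && (flags.getD k 0 == 1))
        (List.filter (fun y => !s1.contains y) s2) = [] := by
      rw [List.filter_eq_nil_iff]
      intro k hk
      rcases hmt k hk with ⟨h2, h1⟩
      simp [hval k, h1, h2, hb2]
    rw [e1, e2, List.append_nil]
    rfl
  · -- set2 - set1 = keys with flag 2
    show PySem.Set.diff s2 s1 = _
    have e1 : List.filter (fun k => !(flags.getD k 0 == 3) && !(flags.getD k 0 == 1)) s1 = [] := by
      rw [List.filter_eq_nil_iff]
      intro k hk
      have h1 := hm1 k hk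
      by_cases h2 : k ∈ array2
      · simp [hval k, h1, h2, hb3]
      · simp [hval k, h1, h2]
    have e2 : List.filter (fun k => !(flags.getD k 0 == 3) && !(flags.getD k 0 == 1))
        (List.filter (fun y => !s1.contains y) s2)
        = List.filter (fun y => !s1.contains y) s2 := by
      rw [List.filter_eq_self]
      intro k hk
      rcases hmt k hk with ⟨h2, h1⟩
      simp [hval k, h1, h2, hb2]
    rw [e1, e2, List.nil_append]
    rfl
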